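-- pv_equiv track=rewrite | github.com/austral-prog/tp-7-JoacoDerito | loops_and_print.py | enumerate_backwards
-- ===== SOURCE A (Python) =====
-- def enumerate_backwards(list):
--     resultado = []
--     indice = 0
--     for i in list:
--         if i:
--             inversa = i[::-1]
--             resultado.append(f"{indice}. {inversa}")
--             indice += 1
--     return resultado
-- ===== SOURCE B (Python) =====
-- def enumerate_backwards(list):
--     # Count the truthy items first, then walk the list from the END,
--     # assigning decreasing indices and building the output back-to-front.
--     k = sum(1 for s in list if s)
--     out = []
--     for s in reversed(list):
--         if s:
--             k -= 1
--             out.append(f"{k}. {s[::-1]}")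
--     out.reverse()
--     return out
-- ===== Notes on version B (the rewrite author's own statement) =====
-- stated objective: alternative
-- what changed: Instead of a forward loop with an increasing counter, B counts the truthy items first, then traverses the list in REVERSE assigning decreasing indices and building the output back-to-front, reversing once at the end.
import Mathlib
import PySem

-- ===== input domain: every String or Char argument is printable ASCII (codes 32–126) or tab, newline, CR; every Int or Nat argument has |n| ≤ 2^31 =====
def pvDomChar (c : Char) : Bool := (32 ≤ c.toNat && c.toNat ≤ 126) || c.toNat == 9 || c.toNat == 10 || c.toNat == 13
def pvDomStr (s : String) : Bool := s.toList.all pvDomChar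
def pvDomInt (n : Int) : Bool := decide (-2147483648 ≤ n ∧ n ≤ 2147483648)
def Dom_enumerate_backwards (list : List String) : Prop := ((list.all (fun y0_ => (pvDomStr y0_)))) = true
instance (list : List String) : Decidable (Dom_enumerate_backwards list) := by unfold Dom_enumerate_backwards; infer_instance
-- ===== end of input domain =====

-- B replaces A's forward loop with an increasing counter by: count the truthy items, then a
-- reverse traversal assigning decreasing indices, building the output back-to-front; same cost.


-- ===== PORT A =====
-- step-for-step port of A: one forward fold carrying (resultado, indice)
def enumerate_backwards (list : List String) : List String :=
  (list.foldl (fun (st : List String × Int) i =>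
      if i ≠ "" then
        let inversa := (PySem.Str.slice? i none none (-1)).getD ""   -- i[::-1]; step -1 ≠ 0 so slice? is some (exact)
        (st.1 ++ [PySem.Int.toStr st.2 ++ ". " ++ inversa], st.2 + 1)
      else st)
    ([], 0)).1

-- ===== PORT B =====
-- port of B: count truthy items, reverse traversal with decreasing index, final reverse
def enumerate_backwards_alt (list : List String) : List String :=
  let k0 : Int := list.foldl (fun c s => if s ≠ "" then c + 1 else c) 0   -- sum(1 for s in list if s)
  ((list.reverse.foldl (fun (st : List String × Int) s =>
      if s ≠ "" then
        let k := st.2 - 1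
        (st.1 ++ [PySem.Int.toStr k ++ ". " ++ (PySem.Str.slice? s none none (-1)).getD ""], k)
      else st)
    ([], k0)).1).reverse

-- ===== PRECONDITION & SPEC =====
def Spec_enumerate_backwards (list : List String) (out : List String) : Prop := out = enumerate_backwards_alt list
instance (list : List String) (out : List String) : Decidable (Spec_enumerate_backwards list out) := by unfold Spec_enumerate_backwards; infer_instance

-- ===== CLAIM (what is proved, stated in full; the proofs are below) =====
def Claim_equal_enumerate_backwards : Prop := ∀ (list : List String), Dom_enumerate_backwards list → Spec_enumerate_backwards list (enumerate_backwards list)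

-- ===== LEMMAS AND PROOFS =====

-- reference: the numbered lines of l, starting index n
def ebRef (l : List String) (n : Int) : List String :=
  match l with
  | [] => []
  | i :: t =>
    if i ≠ "" then
      (PySem.Int.toStr n ++ ". " ++ (PySem.Str.slice? i none none (-1)).getD "") :: ebRef t (n + 1)
    else ebRef t n

lemma eb_count (l : List String) (c : Int) :
    l.foldl (fun c s => if s ≠ "" then c + 1 else c) c
      = c + ((l.filter (fun s => s ≠ "")).length : Int) := by
  induction l generalizing c with
  | nil => simp
  | cons h t ih =>
    simp only [List.foldl_cons, List.filter_cons]
    by_cases hh : h = ""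
    · rw [if_neg (by simp [hh]), if_neg (by simp [hh])]
      exact ih c
    · rw [if_pos (by simp [hh]), if_pos (by simp [hh]), ih (c + 1)]
      push_cast [List.length_cons]
      ring

lemma eb_A_loop (l : List String) (acc : List String) (n : Int) :
    (l.foldl (fun (st : List String × Int) i =>
      if i ≠ "" then
        (st.1 ++ [PySem.Int.toStr st.2 ++ ". " ++ (PySem.Str.slice? i none none (-1)).getD ""], st.2 + 1)
      else st) (acc, n)).1 = acc ++ ebRef l n := by
  induction l generalizing acc n with
  | nil => simp [ebRef]
  | cons i t ih =>
    by_cases h : i = ""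
    · simpa [h, ebRef] using ih acc n
    · simp only [List.foldl_cons, h, ebRef, ne_eq, not_false_iff, if_pos]
      rw [ih]; simp

lemma eb_B_loop (l : List String) (acc : List String) (n : Int) :
    l.reverse.foldl (fun (st : List String × Int) s =>
      if s ≠ "" then
        (st.1 ++ [PySem.Int.toStr (st.2 - 1) ++ ". " ++ (PySem.Str.slice? s none none (-1)).getD ""], st.2 - 1)
      else st) (acc, n + ((l.filter (fun s => s ≠ "")).length : Int))
    = (acc ++ (ebRef l n).reverse, n) := by
  induction l generalizing acc n with
  | nil => simp [ebRef]
  | cons i t ih =>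
    by_cases h : i = ""
    · have hf : (i :: t).filter (fun s => s ≠ "") = t.filter (fun s => s ≠ "") := by
        simp [h]
      rw [List.reverse_cons, List.foldl_append, hf, ih acc n]
      simp [ebRef, h]
    · have hf : (i :: t).filter (fun s => s ≠ "") = i :: t.filter (fun s => s ≠ "") := by
        simp [h]
      have hc : n + (((i :: t).filter (fun s => s ≠ "")).length : Int)
          = (n + 1) + ((t.filter (fun s => s ≠ "")).length : Int) := by
        rw [hf]; push_cast [List.length_cons]; ring
      rw [List.reverse_cons, List.foldl_append, hc, ih acc (n + 1)]
      simp [ebRef, h]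

-- ===== VERDICT (by name: the statement is the Claim_ definition above) =====
theorem enumerate_backwards_spec : Claim_equal_enumerate_backwards := by
  intro list _
  unfold Spec_enumerate_backwards enumerate_backwards enumerate_backwards_alt
  have hb := eb_B_loop list [] 0
  rw [zero_add] at hb
  simp only [eb_A_loop list [] 0, List.nil_append, eb_count, zero_add, hb, List.reverse_reverse]
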